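-- pv_equiv track=rewrite | github.com/aman27singh/careercoachhhh | app/services/skill_impact_engine.py | _closest_role
-- ===== SOURCE A (Python) =====
-- def _closest_role(target_role: str, available_roles: list[str]) -> str | None:
--     """Case-insensitive fuzzy match for the target role against available roles."""
--     target_lower = target_role.lower()
--     for role in available_roles:
--         if role.lower() == target_lower:
--             return role
--     # Partial match fallback
--     for role in available_roles:
--         if target_lower in role.lower() or role.lower() in target_lower:
--             return role
--     return None
-- ===== SOURCE B (Python) =====
-- def _closest_role(target_role: str, available_roles: list[str]) -> str | None:
--     """Single pass: return first exact (case-insensitive) match immediately,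
--     remember the first partial match as a fallback."""
--     target_lower = target_role.lower()
--     first_partial = None
--     for role in available_roles:
--         rl = role.lower()
--         if rl == target_lower:
--             return role
--         if first_partial is None and (target_lower in rl or rl in target_lower):
--             first_partial = role
--     return first_partial
-- ===== Notes on version B (the rewrite author's own statement) =====
-- stated objective: alternative
-- what changed: Replaces A's two sequential scans (exact pass, then partial pass) with a single traversal that returns on the first exact match and remembers the first partial match as a fallback, so the list is walked once instead of up to twice.
import Mathlib
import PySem

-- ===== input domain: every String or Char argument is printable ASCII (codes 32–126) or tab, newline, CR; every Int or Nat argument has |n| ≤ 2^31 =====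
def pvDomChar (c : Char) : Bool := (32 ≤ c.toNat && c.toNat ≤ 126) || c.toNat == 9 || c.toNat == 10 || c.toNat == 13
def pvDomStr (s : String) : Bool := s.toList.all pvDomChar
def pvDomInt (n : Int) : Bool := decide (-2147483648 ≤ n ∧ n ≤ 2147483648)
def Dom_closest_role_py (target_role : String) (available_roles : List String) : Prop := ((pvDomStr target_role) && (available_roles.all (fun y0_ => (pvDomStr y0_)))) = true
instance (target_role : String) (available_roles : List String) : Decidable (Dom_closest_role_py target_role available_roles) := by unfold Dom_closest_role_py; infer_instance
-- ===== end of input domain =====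

-- B replaces A's two sequential scans with one traversal that returns on the first exact
-- match and remembers the first partial match as a fallback (objective: alternative).

-- ===== PORT A =====
-- first loop of A: first role with role.lower() == target_lower
def pvAExact (tl : String) : List String → Option String
  | [] => none
  | r :: rs => if PySem.Str.lower r == tl then some r else pvAExact tl rs

-- second loop of A: first role with a partial containment match
def pvAPartial (tl : String) : List String → Option String
  | [] => none
  | r :: rs =>
      if PySem.Str.isIn tl (PySem.Str.lower r) || PySem.Str.isIn (PySem.Str.lower r) tl then some r
      else pvAPartial tl rs

def closest_role_py (target_role : String) (available_roles : List String) : Option String :=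
  let target_lower := PySem.Str.lower target_role
  match pvAExact target_lower available_roles with
  | some r => some r
  | none => pvAPartial target_lower available_roles

-- ===== PORT B =====
-- B's single loop, carrying the remembered first partial match
def pvBLoop (tl : String) (firstPartial : Option String) : List String → Option String
  | [] => firstPartial
  | r :: rs =>
      let rl := PySem.Str.lower r
      if rl == tl then some r
      else
        pvBLoop tl
          (if firstPartial.isNone && (PySem.Str.isIn tl rl || PySem.Str.isIn rl tl) then some r
           else firstPartial) rs

def closest_role_py_alt (target_role : String) (available_roles : List String) : Option String :=
  pvBLoop (PySem.Str.lower target_role) none available_roles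

-- ===== PRECONDITION & SPEC =====
def Spec_closest_role_py (target_role : String) (available_roles : List String) (out : Option String) : Prop := out = closest_role_py_alt target_role available_roles
instance (target_role : String) (available_roles : List String) (out : Option String) : Decidable (Spec_closest_role_py target_role available_roles out) := by unfold Spec_closest_role_py; infer_instance

-- ===== CLAIM (what is proved, stated in full; the proofs are below) =====
def Claim_equal_closest_role_py : Prop := ∀ (target_role : String) (available_roles : List String), Dom_closest_role_py target_role available_roles → Spec_closest_role_py target_role available_roles (closest_role_py target_role available_roles)

-- ===== LEMMAS AND PROOFS =====
theorem pvBLoop_eq (tl : String) (roles : List String) :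
    ∀ fp : Option String,
      pvBLoop tl fp roles =
        match pvAExact tl roles with
        | some r => some r
        | none => fp.or (pvAPartial tl roles) := by
  induction roles with
  | nil => intro fp; cases fp <;> simp [pvBLoop, pvAExact, pvAPartial, Option.or]
  | cons r rs ih =>
    intro fp
    by_cases hx : PySem.Str.lower r == tl
    · simp [pvBLoop, pvAExact, hx]
    · simp only [pvBLoop, pvAExact, hx, if_neg, Bool.false_eq_true, not_false_eq_true]
      rw [ih]
      cases fp with
      | some v => simp [Option.or]
      | none =>
        cases hp : (PySem.Str.isIn tl (PySem.Str.lower r) || PySem.Str.isIn (PySem.Str.lower r) tl)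
        · simp only [pvAPartial, hp, Option.isNone_none, Bool.true_and, if_false,
            Bool.false_eq_true, Option.or]
        · simp only [pvAPartial, hp, Option.isNone_none, Bool.true_and, if_true, Option.or]

-- ===== VERDICT (by name: the statement is the Claim_ definition above) =====
theorem closest_role_py_spec : Claim_equal_closest_role_py := by
  intro t roles _
  unfold Spec_closest_role_py closest_role_py closest_role_py_alt
  rw [pvBLoop_eq]
  cases h : pvAExact (PySem.Str.lower t) roles <;> simp [h, Option.or]
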